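-- pv_equiv track=rewrite | github.com/rubenvandelanotte/SettlementSimulatorV3 | SettlementModel.py | get_settled_amount_iterative
-- ===== SOURCE A (Python) =====
-- def get_settled_amount_iterative(parent_id, child_map, status_cache, amount_cache):
--     """
--     Iterative calculation of total settled amount for all descendants of an instruction.
--
--     Args:
--         parent_id (str): ID of the parent instruction
--         child_map (dict): Dictionary mapping parent IDs to lists of child IDs
--         status_cache (dict): Dictionary mapping instruction IDs to their status
--         amount_cache (dict): Dictionary mapping instruction IDs to their amounts
--
--     Returns:
--         int: Total settled amount from all descendants
--     """
--     total = 0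
--     processed = set()
--
--     # Start with direct children of parent
--     queue = child_map.get(parent_id, [])
--
--     # Process all descendants
--     while queue:
--         current_id = queue.pop(0)
--
--         if current_id in processed:
--             continue
--         processed.add(current_id)
--
--         # Add settled amount if this instruction is settled on time
--         if status_cache.get(current_id) == "Settled on time":
--             total += amount_cache.get(current_id, 0)
--
--         # Add all children to the queue
--         queue.extend(child_map.get(current_id, []))
--
--     return total
-- ===== SOURCE B (Python) =====
-- def get_settled_amount_iterative(parent_id, child_map, status_cache, amount_cache):
--     """Two-phase level-synchronous version: first saturate the set of all
--     descendants of parent_id by expanding whole frontiers of new nodes at a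
--     time (no per-node queue), then sum the settled amounts over that set in
--     one comprehension.  Unlike the original, this never mutates child_map."""
--     visited = set()
--     frontier = set(child_map.get(parent_id, []))
--     while frontier:
--         visited |= frontier
--         next_frontier = set()
--         for node in frontier:
--             for child in child_map.get(node, []):
--                 if child not in visited:
--                     next_frontier.add(child)
--         frontier = next_frontier
--     return sum(
--         amount_cache.get(node, 0)
--         for node in visited
--         if status_cache.get(node) == "Settled on time"
--     )
-- ===== Notes on version B (the rewrite author's own statement) =====
-- stated objective: alternative
-- what changed: Replaces the single FIFO queue with mark-on-pop and interleaved accumulation by a two-phase level-synchronous saturation: whole frontiers of unseen nodes are expanded via set operations until the descendant set is closed, then the settled amounts are summed over that set in one comprehension; B also never mutates child_map (A pops from the list object held in the dict).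
import Mathlib
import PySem

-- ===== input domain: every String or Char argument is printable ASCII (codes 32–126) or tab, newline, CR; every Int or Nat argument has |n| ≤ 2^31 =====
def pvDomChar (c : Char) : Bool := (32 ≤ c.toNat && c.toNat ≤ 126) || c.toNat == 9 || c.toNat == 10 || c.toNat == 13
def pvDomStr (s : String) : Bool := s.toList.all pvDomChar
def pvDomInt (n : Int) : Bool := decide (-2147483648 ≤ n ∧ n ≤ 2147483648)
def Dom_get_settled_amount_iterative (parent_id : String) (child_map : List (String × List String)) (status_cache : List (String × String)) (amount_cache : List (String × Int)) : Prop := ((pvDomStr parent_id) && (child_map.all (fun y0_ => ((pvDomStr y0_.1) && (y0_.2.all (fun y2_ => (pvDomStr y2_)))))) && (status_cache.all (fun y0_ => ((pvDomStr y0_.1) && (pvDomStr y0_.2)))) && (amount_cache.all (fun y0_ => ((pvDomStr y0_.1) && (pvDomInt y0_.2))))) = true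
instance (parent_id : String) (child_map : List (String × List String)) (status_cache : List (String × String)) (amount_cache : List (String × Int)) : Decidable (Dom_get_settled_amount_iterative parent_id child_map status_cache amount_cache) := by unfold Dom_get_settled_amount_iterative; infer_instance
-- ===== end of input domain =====

-- B replaces the per-node FIFO queue by a two-phase level-synchronous saturation (expand whole
-- frontiers of new nodes, then sum over the visited set once); equivalence is about the RETURN
-- value only: Python A pops from the list object held in child_map (observable mutation), B never
-- mutates its arguments.

-- ===== PORT A =====
-- child_map.get(x, [])
def pvChildren (cm : List (String × List String)) (x : String) : List String :=
  (PySem.Dict.mk cm).getD x []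

-- the while-queue loop of A; the Nat argument is a fuel artifact (pvAFuel is proved sufficient)
def pvALoop (cm : List (String × List String)) (sc : List (String × String)) (ac : List (String × Int)) :
    Nat → List String → PySem.Set String → Int → Int
  | 0, _, _, total => total
  | _ + 1, [], _, total => total
  | f + 1, c :: q, proc, total =>
    if PySem.Set.contains proc c then pvALoop cm sc ac f q proc total
    else
      pvALoop cm sc ac f (q ++ pvChildren cm c) (PySem.Set.add proc c)
        (if (PySem.Dict.mk sc).get? c = some "Settled on time"
         then total + (PySem.Dict.mk ac).getD c 0 else total)

def pvAFuel (cm : List (String × List String)) (q0 : List String) : Nat :=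
  q0.length +
    ((PySem.List.dedup (q0 ++ (cm.map Prod.snd).flatten)).map
      (fun x => 1 + (pvChildren cm x).length)).sum + 1

def get_settled_amount_iterative (parent_id : String) (child_map : List (String × List String)) (status_cache : List (String × String)) (amount_cache : List (String × Int)) : Int :=
  let q0 := (PySem.Dict.mk child_map).getD parent_id []
  pvALoop child_map status_cache amount_cache (pvAFuel child_map q0) q0 PySem.Set.empty 0

-- ===== PORT B =====
-- build next_frontier: children of the frontier not already visited (visited already includes the frontier)
def pvBStep (cm : List (String × List String)) (visited frontier : PySem.Set String) : PySem.Set String :=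
  frontier.foldl (fun nf node =>
    (pvChildren cm node).foldl (fun nf child =>
      if PySem.Set.contains visited child then nf else PySem.Set.add nf child) nf) PySem.Set.empty

-- the while-frontier loop of B; fuel artifact as in A's port (each round visits ≥ 1 new node)
def pvBLoop (cm : List (String × List String)) :
    Nat → PySem.Set String → PySem.Set String → PySem.Set String
  | 0, visited, _ => visited
  | f + 1, visited, frontier =>
    if frontier.isEmpty then visited
    else
      let visited' := PySem.Set.union visited frontier
      pvBLoop cm f visited' (pvBStep cm visited' frontier)

def get_settled_amount_iterative_alt (parent_id : String) (child_map : List (String × List String)) (status_cache : List (String × String)) (amount_cache : List (String × Int)) : Int :=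
  let q0 := (PySem.Dict.mk child_map).getD parent_id []
  let fuel := (PySem.List.dedup (q0 ++ (child_map.map Prod.snd).flatten)).length + 1
  let visited := pvBLoop child_map fuel PySem.Set.empty (PySem.Set.ofList q0)
  visited.foldl (fun t node =>
    if (PySem.Dict.mk status_cache).get? node = some "Settled on time"
    then t + (PySem.Dict.mk amount_cache).getD node 0 else t) 0

-- ===== PRECONDITION & SPEC =====
def Spec_get_settled_amount_iterative (parent_id : String) (child_map : List (String × List String)) (status_cache : List (String × String)) (amount_cache : List (String × Int)) (out : Int) : Prop := out = get_settled_amount_iterative_alt parent_id child_map status_cache amount_cache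
instance (parent_id : String) (child_map : List (String × List String)) (status_cache : List (String × String)) (amount_cache : List (String × Int)) (out : Int) : Decidable (Spec_get_settled_amount_iterative parent_id child_map status_cache amount_cache out) := by unfold Spec_get_settled_amount_iterative; infer_instance

-- ===== CLAIM (what is proved, stated in full; the proofs are below) =====
def Claim_equal_get_settled_amount_iterative : Prop := ∀ (parent_id : String) (child_map : List (String × List String)) (status_cache : List (String × String)) (amount_cache : List (String × Int)), Dom_get_settled_amount_iterative parent_id child_map status_cache amount_cache → Spec_get_settled_amount_iterative parent_id child_map status_cache amount_cache (get_settled_amount_iterative parent_id child_map status_cache amount_cache)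

-- ===== LEMMAS AND PROOFS =====

-- edge relation of the child graph and reachability from a list of start nodes
def pvRel (cm : List (String × List String)) (a b : String) : Prop := b ∈ pvChildren cm a

def pvReach (cm : List (String × List String)) (S : List String) (x : String) : Prop :=
  ∃ s ∈ S, Relation.ReflTransGen (pvRel cm) s x

-- the contribution of one node to the total
def pvW (sc : List (String × String)) (ac : List (String × Int)) (x : String) : Int :=
  if (PySem.Dict.mk sc).get? x = some "Settled on time"
  then (PySem.Dict.mk ac).getD x 0 else 0

-- sum of contributions of nodes of U reachable from S and not yet in P
noncomputable def pvRestSum (cm : List (String × List String)) (sc : List (String × String))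
    (ac : List (String × Int)) (U S P : List String) : Int :=
  (@Finset.filter _ (fun x => pvReach cm S x ∧ x ∉ P)
    (fun _ => Classical.propDecidable _) U.toFinset).sum (pvW sc ac)

-- potential bounding the number of remaining iterations of A's loop
def pvPhi (cm : List (String × List String)) (U : List String) (q : List String)
    (proc : List String) : Nat :=
  q.length + (U.toFinset.filter (fun x => x ∉ proc)).sum (fun x => 1 + (pvChildren cm x).length)

theorem pv_get?_mem_values (cm : List (String × List String)) (x : String) (l : List String)
    (h : (PySem.Dict.mk cm).get? x = some l) : l ∈ cm.map Prod.snd := by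
  induction cm with
  | nil => simp [PySem.Dict.get?] at h
  | cons p rest ih =>
    rw [PySem.Dict.get?_mk_cons] at h
    by_cases hk : p.1 == x
    · simp [hk] at h; simp [← h]
    · simp [hk] at h
      exact List.mem_cons_of_mem _ (ih h)

theorem pv_children_sub (cm : List (String × List String)) (x : String) :
    ∀ c ∈ pvChildren cm x, c ∈ (cm.map Prod.snd).flatten := by
  intro c hc
  unfold pvChildren at hc
  rw [PySem.Dict.getD_eq_get?_getD] at hc
  cases h : (PySem.Dict.mk cm).get? x with
  | none => rw [h] at hc; simp at hc
  | some l =>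
    rw [h] at hc
    exact List.mem_flatten.mpr ⟨l, pv_get?_mem_values cm x l h, hc⟩

-- escape lemma: a path starting in a set P whose children stay in P ∪ Q either stays in P or
-- passes through a node of Q outside P
theorem pv_escape (cm : List (String × List String)) (P Q : List String)
    (hcl : ∀ p ∈ P, ∀ c ∈ pvChildren cm p, c ∈ P ∨ c ∈ Q)
    (s x : String) (hs : s ∈ P) (hpath : Relation.ReflTransGen (pvRel cm) s x) :
    x ∈ P ∨ ∃ q, q ∈ Q ∧ q ∉ P ∧ Relation.ReflTransGen (pvRel cm) q x := by
  induction hpath with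
  | refl => exact Or.inl hs
  | @tail y z hyz hedge ih =>
    rcases ih with hyP | ⟨q, hqQ, hqP, hqpath⟩
    · rcases hcl _ hyP _ hedge with hP | hQ
      · exact Or.inl hP
      · by_cases hxP : z ∈ P
        · exact Or.inl hxP
        · exact Or.inr ⟨z, hQ, hxP, Relation.ReflTransGen.refl⟩
    · exact Or.inr ⟨q, hqQ, hqP, hqpath.tail hedge⟩

theorem pvRestSum_nil (cm : List (String × List String)) (sc : List (String × String))
    (ac : List (String × Int)) (U P : List String) : pvRestSum cm sc ac U [] P = 0 := by
  unfold pvRestSum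
  rw [@Finset.filter_false_of_mem _ _ (fun _ => Classical.propDecidable _) _
    (by rintro x - ⟨⟨s, hs, -⟩, -⟩; simp at hs), Finset.sum_empty]

-- dropping an already-processed head of the queue does not change the remaining sum
theorem pvRestSum_skip (cm : List (String × List String)) (sc : List (String × String))
    (ac : List (String × Int)) (U : List String) (c : String) (q P : List String)
    (hc : c ∈ P) (hcl : ∀ p ∈ P, ∀ c' ∈ pvChildren cm p, c' ∈ P ∨ c' ∈ c :: q) :
    pvRestSum cm sc ac U (c :: q) P = pvRestSum cm sc ac U q P := by
  unfold pvRestSum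
  congr 1
  apply Finset.ext
  intro z
  simp only [Finset.mem_filter]
  constructor
  · rintro ⟨hzU, ⟨s, hs, hpath⟩, hzP⟩
    refine ⟨hzU, ?_, hzP⟩
    rcases List.mem_cons.mp hs with hsc | hs'
    · rcases pv_escape cm P (c :: q) hcl c z hc (hsc ▸ hpath) with h | ⟨w, hwQ, hwP, hwpath⟩
      · exact absurd h hzP
      · rcases List.mem_cons.mp hwQ with hwc | hw'
        · exact absurd (hwc ▸ hc) hwP
        · exact ⟨w, hw', hwpath⟩
    · exact ⟨s, hs', hpath⟩
  · rintro ⟨hzU, ⟨s, hs, hpath⟩, hzP⟩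
    exact ⟨hzU, ⟨s, List.mem_cons_of_mem _ hs, hpath⟩, hzP⟩

-- processing a fresh head: its weight splits off the remaining sum
theorem pvRestSum_pop (cm : List (String × List String)) (sc : List (String × String))
    (ac : List (String × Int)) (U : List String) (c : String) (q : List String)
    (proc : PySem.Set String) (hcU : c ∈ U) (hc : c ∉ proc) :
    pvRestSum cm sc ac U (c :: q) proc =
      pvW sc ac c + pvRestSum cm sc ac U (q ++ pvChildren cm c) (PySem.Set.add proc c) := by
  unfold pvRestSum
  have hset : (@Finset.filter _ (fun x => pvReach cm (c :: q) x ∧ x ∉ proc)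
      (fun _ => Classical.propDecidable _) U.toFinset) =
      insert c (@Finset.filter _
        (fun x => pvReach cm (q ++ pvChildren cm c) x ∧ x ∉ PySem.Set.add proc c)
        (fun _ => Classical.propDecidable _) U.toFinset) := by
    apply Finset.ext
    intro z
    simp only [Finset.mem_filter, Finset.mem_insert]
    constructor
    · rintro ⟨hzU, ⟨s, hs, hpath⟩, hzP⟩
      by_cases hzc : z = c
      · exact Or.inl hzc
      · refine Or.inr ⟨hzU, ?_, fun hm => by
          rcases (PySem.Set.mem_add proc c z).mp hm with h | h
          exacts [hzP h, hzc h]⟩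
        rcases List.mem_cons.mp hs with rfl | hs'
        · rcases Relation.ReflTransGen.cases_head hpath with rfl | ⟨m, hm, hmpath⟩
          · exact absurd rfl hzc
          · exact ⟨m, List.mem_append_right _ hm, hmpath⟩
        · exact ⟨s, List.mem_append_left _ hs', hpath⟩
    · rintro (rfl | ⟨hzU, ⟨s, hs, hpath⟩, hzP⟩)
      · exact ⟨List.mem_toFinset.mpr hcU, ⟨z, List.mem_cons_self, Relation.ReflTransGen.refl⟩, hc⟩
      · refine ⟨hzU, ?_, fun hm => hzP ((PySem.Set.mem_add proc c z).mpr (Or.inl hm))⟩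
        rcases List.mem_append.mp hs with hs' | hs'
        · exact ⟨s, List.mem_cons_of_mem _ hs', hpath⟩
        · exact ⟨c, List.mem_cons_self, Relation.ReflTransGen.head hs' hpath⟩
  rw [hset, Finset.sum_insert (by
    simp only [Finset.mem_filter]
    rintro ⟨-, -, hcP⟩
    exact hcP ((PySem.Set.mem_add proc c c).mpr (Or.inr rfl)))]

-- splitting the potential at a fresh head
theorem pvPhi_split (cm : List (String × List String)) (U : List String) (c : String)
    (proc : PySem.Set String) (hcU : c ∈ U) (hc : c ∉ proc) :
    (U.toFinset.filter (fun x => x ∉ proc)).sum (fun x => 1 + (pvChildren cm x).length) =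
      1 + (pvChildren cm c).length +
      (U.toFinset.filter (fun x => x ∉ PySem.Set.add proc c)).sum
        (fun x => 1 + (pvChildren cm x).length) := by
  have hset : U.toFinset.filter (fun x => x ∉ proc) =
      insert c (U.toFinset.filter (fun x => x ∉ PySem.Set.add proc c)) := by
    apply Finset.ext
    intro z
    simp only [Finset.mem_filter, Finset.mem_insert, PySem.Set.mem_add]
    constructor
    · rintro ⟨hzU, hzP⟩
      by_cases hzc : z = c
      · exact Or.inl hzc
      · exact Or.inr ⟨hzU, fun h => by rcases h with h | h; exacts [hzP h, hzc h]⟩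
    · rintro (rfl | ⟨hzU, hzP⟩)
      · exact ⟨List.mem_toFinset.mpr hcU, hc⟩
      · exact ⟨hzU, fun h => hzP (Or.inl h)⟩
  rw [hset, Finset.sum_insert (by
    simp only [Finset.mem_filter, PySem.Set.mem_add]
    rintro ⟨-, hcP⟩
    exact hcP (Or.inr trivial))]

-- A's loop computes the remaining sum (invariant proof)
theorem pvALoop_eq (cm : List (String × List String)) (sc : List (String × String))
    (ac : List (String × Int)) (U : List String) (_hU : U.Nodup)
    (hUsub : ∀ x ∈ U, ∀ c ∈ pvChildren cm x, c ∈ U) :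
    ∀ (fuel : Nat) (q : List String) (proc : PySem.Set String) (total : Int),
    (∀ x ∈ q, x ∈ U) →
    (∀ p ∈ proc, ∀ c ∈ pvChildren cm p, c ∈ proc ∨ c ∈ q) →
    pvPhi cm U q proc < fuel →
    pvALoop cm sc ac fuel q proc total = total + pvRestSum cm sc ac U q proc := by
  intro fuel
  induction fuel with
  | zero =>
    intro q proc total _ _ hphi
    exact absurd hphi (Nat.not_lt_zero _)
  | succ f ih =>
    intro q proc total hq hcl hphi
    cases q with
    | nil =>
      simp only [pvALoop]
      rw [pvRestSum_nil]
      omega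
    | cons c q' =>
      simp only [pvALoop]
      by_cases hcp : PySem.Set.contains proc c = true
      · rw [if_pos hcp]
        have hc : c ∈ proc := (PySem.Set.contains_iff _ _).mp hcp
        rw [ih q' proc total (fun x hx => hq x (List.mem_cons_of_mem _ hx))
          (fun p hp c' hc' => by
            rcases hcl p hp c' hc' with h | h
            · exact Or.inl h
            · rcases List.mem_cons.mp h with rfl | h'
              exacts [Or.inl hc, Or.inr h'])
          (by unfold pvPhi at hphi ⊢; simp only [List.length_cons] at hphi; omega)]
        rw [pvRestSum_skip cm sc ac U c q' proc hc hcl]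
      · rw [if_neg hcp]
        have hc : c ∉ proc := fun hm => hcp ((PySem.Set.contains_iff _ _).mpr hm)
        have hcU : c ∈ U := hq c List.mem_cons_self
        have hq'' : ∀ x ∈ q' ++ pvChildren cm c, x ∈ U := by
          intro x hx
          rcases List.mem_append.mp hx with h | h
          · exact hq x (List.mem_cons_of_mem _ h)
          · exact hUsub c hcU x h
        have hcl'' : ∀ p ∈ PySem.Set.add proc c, ∀ c' ∈ pvChildren cm p,
            c' ∈ PySem.Set.add proc c ∨ c' ∈ q' ++ pvChildren cm c := by
          intro p hp c' hc'
          rcases (PySem.Set.mem_add proc c p).mp hp with hp' | rfl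
          · rcases hcl p hp' c' hc' with h | h
            · exact Or.inl ((PySem.Set.mem_add proc c c').mpr (Or.inl h))
            · rcases List.mem_cons.mp h with rfl | h'
              · exact Or.inl ((PySem.Set.mem_add proc c' c').mpr (Or.inr rfl))
              · exact Or.inr (List.mem_append_left _ h')
          · exact Or.inr (List.mem_append_right _ hc')
        have hphi'' : pvPhi cm U (q' ++ pvChildren cm c) (PySem.Set.add proc c) < f := by
          have hsplit := pvPhi_split cm U c proc hcU hc
          unfold pvPhi at hphi ⊢
          simp only [List.length_cons, List.length_append] at hphi ⊢
          omega
        rw [ih _ _ _ hq'' hcl'' hphi'']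
        rw [pvRestSum_pop cm sc ac U c q' proc hcU hc]
        unfold pvW
        split_ifs <;> ring

-- one frontier-expansion step: membership and nodup
-- membership/nodup of the inner children fold of pvBStep
theorem pv_inner_mem (visited : PySem.Set String) (l : List String) :
    ∀ (nf : PySem.Set String) (x : String),
    (x ∈ l.foldl (fun nf child => if PySem.Set.contains visited child then nf
        else PySem.Set.add nf child) nf) ↔ x ∈ nf ∨ (x ∈ l ∧ x ∉ visited) := by
  induction l with
  | nil => simp
  | cons c cs ih =>
    intro nf x
    simp only [List.foldl_cons]
    by_cases h : PySem.Set.contains visited c = true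
    · rw [if_pos h, ih]
      have hc : c ∈ visited := (PySem.Set.contains_iff _ _).mp h
      simp only [List.mem_cons]
      constructor
      · rintro (h1 | ⟨h2, h3⟩)
        · exact Or.inl h1
        · exact Or.inr ⟨Or.inr h2, h3⟩
      · rintro (h1 | ⟨(rfl | h2), h3⟩)
        · exact Or.inl h1
        · exact absurd hc h3
        · exact Or.inr ⟨h2, h3⟩
    · rw [if_neg h, ih]
      have hc : c ∉ visited := fun hm => h ((PySem.Set.contains_iff _ _).mpr hm)
      simp only [PySem.Set.mem_add, List.mem_cons]
      constructor
      · rintro ((h1 | rfl) | ⟨h2, h3⟩)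
        · exact Or.inl h1
        · exact Or.inr ⟨Or.inl rfl, hc⟩
        · exact Or.inr ⟨Or.inr h2, h3⟩
      · rintro (h1 | ⟨(rfl | h2), h3⟩)
        · exact Or.inl (Or.inl h1)
        · exact Or.inl (Or.inr rfl)
        · exact Or.inr ⟨h2, h3⟩

theorem pv_inner_nodup (visited : PySem.Set String) (l : List String) :
    ∀ (nf : PySem.Set String), nf.Nodup →
    (l.foldl (fun nf child => if PySem.Set.contains visited child then nf
        else PySem.Set.add nf child) nf).Nodup := by
  induction l with
  | nil => intro nf h; exact h
  | cons c cs ih =>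
    intro nf h
    simp only [List.foldl_cons]
    by_cases hb : PySem.Set.contains visited c = true
    · rw [if_pos hb]; exact ih nf h
    · rw [if_neg hb]; exact ih _ (PySem.Set.nodup_add _ _ h)

theorem pv_outer_mem (cm : List (String × List String)) (visited : PySem.Set String)
    (fr : List String) :
    ∀ (nf : PySem.Set String) (x : String),
    (x ∈ fr.foldl (fun nf node => (pvChildren cm node).foldl
        (fun nf child => if PySem.Set.contains visited child then nf
          else PySem.Set.add nf child) nf) nf) ↔
      x ∈ nf ∨ ((∃ n ∈ fr, x ∈ pvChildren cm n) ∧ x ∉ visited) := by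
  induction fr with
  | nil => simp
  | cons n ns ih =>
    intro nf x
    simp only [List.foldl_cons]
    rw [ih, pv_inner_mem]
    simp only [List.mem_cons]
    constructor
    · rintro ((h1 | ⟨h2, h3⟩) | ⟨⟨m, hm, hxm⟩, h3⟩)
      · exact Or.inl h1
      · exact Or.inr ⟨⟨n, Or.inl rfl, h2⟩, h3⟩
      · exact Or.inr ⟨⟨m, Or.inr hm, hxm⟩, h3⟩
    · rintro (h1 | ⟨⟨m, (rfl | hm), hxm⟩, h3⟩)
      · exact Or.inl (Or.inl h1)
      · exact Or.inl (Or.inr ⟨hxm, h3⟩)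
      · exact Or.inr ⟨⟨m, hm, hxm⟩, h3⟩

theorem pv_outer_nodup (cm : List (String × List String)) (visited : PySem.Set String)
    (fr : List String) : ∀ (nf : PySem.Set String), nf.Nodup →
    (fr.foldl (fun nf node => (pvChildren cm node).foldl
        (fun nf child => if PySem.Set.contains visited child then nf
          else PySem.Set.add nf child) nf) nf).Nodup := by
  induction fr with
  | nil => intro nf h; exact h
  | cons n ns ih =>
    intro nf h
    simp only [List.foldl_cons]
    exact ih _ (pv_inner_nodup visited _ _ h)

theorem pvBStep_mem (cm : List (String × List String)) (visited frontier : PySem.Set String)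
    (x : String) :
    x ∈ pvBStep cm visited frontier ↔ (∃ n ∈ frontier, x ∈ pvChildren cm n) ∧ x ∉ visited := by
  unfold pvBStep
  rw [pv_outer_mem]
  simp [PySem.Set.empty]

theorem pvBStep_nodup (cm : List (String × List String)) (visited frontier : PySem.Set String) :
    (pvBStep cm visited frontier).Nodup := by
  unfold pvBStep
  exact pv_outer_nodup cm visited frontier _ (by simp [PySem.Set.empty])

-- B's loop saturates: the final visited set is visited ∪ (reachable from frontier)
theorem pvBLoop_mem (cm : List (String × List String)) (U : List String) (_hU : U.Nodup)
    (hUsub : ∀ x ∈ U, ∀ c ∈ pvChildren cm x, c ∈ U) :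
    ∀ (fuel : Nat) (visited frontier : PySem.Set String),
    visited.Nodup → frontier.Nodup →
    (∀ x ∈ visited, x ∈ U) → (∀ x ∈ frontier, x ∈ U) →
    (∀ x ∈ frontier, x ∉ visited) →
    (∀ v ∈ visited, ∀ c ∈ pvChildren cm v, c ∈ visited ∨ c ∈ frontier) →
    (U.toFinset.filter (fun x => x ∉ visited)).card < fuel →
    (pvBLoop cm fuel visited frontier).Nodup ∧
      (∀ x, x ∈ pvBLoop cm fuel visited frontier ↔ x ∈ visited ∨ pvReach cm frontier x) := by
  intro fuel
  induction fuel with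
  | zero =>
    intro visited frontier _ _ _ _ _ _ hcard
    exact absurd hcard (Nat.not_lt_zero _)
  | succ f ih =>
    intro visited frontier hvn hfn hvU hfU hdisj hcl hcard
    simp only [pvBLoop]
    by_cases hfe : frontier.isEmpty = true
    · rw [if_pos hfe]
      have hfnil : frontier = [] := List.isEmpty_iff.mp hfe
      subst hfnil
      refine ⟨hvn, fun x => ?_⟩
      simp [pvReach]
    · rw [if_neg hfe]
      have hfnil : frontier ≠ [] := fun h => hfe (List.isEmpty_iff.mpr h)
      have hmemU : ∀ x, x ∈ PySem.Set.union visited frontier ↔ x ∈ visited ∨ x ∈ frontier :=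
        fun x => PySem.Set.mem_union visited frontier x
      have hstep : ∀ x, x ∈ pvBStep cm (PySem.Set.union visited frontier) frontier ↔
          (∃ n ∈ frontier, x ∈ pvChildren cm n) ∧ x ∉ PySem.Set.union visited frontier :=
        fun x => pvBStep_mem cm _ frontier x
      have hcl' : ∀ v ∈ PySem.Set.union visited frontier, ∀ c ∈ pvChildren cm v,
          c ∈ PySem.Set.union visited frontier ∨
            c ∈ pvBStep cm (PySem.Set.union visited frontier) frontier := by
        intro v hv c hc
        rcases (hmemU v).mp hv with hv1 | hv1
        · rcases hcl v hv1 c hc with h1 | h1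
          · exact Or.inl ((hmemU c).mpr (Or.inl h1))
          · exact Or.inl ((hmemU c).mpr (Or.inr h1))
        · by_cases hcv : c ∈ PySem.Set.union visited frontier
          · exact Or.inl hcv
          · exact Or.inr ((hstep c).mpr ⟨⟨v, hv1, hc⟩, hcv⟩)
      have hcard' : (U.toFinset.filter
          (fun x => x ∉ PySem.Set.union visited frontier)).card < f := by
        obtain ⟨y, hy⟩ := List.exists_mem_of_ne_nil frontier hfnil
        have hss : U.toFinset.filter (fun x => x ∉ PySem.Set.union visited frontier) ⊂
            U.toFinset.filter (fun x => x ∉ visited) := by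
          constructor
          · intro z hz
            rw [Finset.mem_filter] at hz ⊢
            exact ⟨hz.1, fun hzv => hz.2 ((hmemU z).mpr (Or.inl hzv))⟩
          · intro hsub
            have hy1 : y ∈ U.toFinset.filter (fun x => x ∉ visited) := by
              rw [Finset.mem_filter]
              exact ⟨List.mem_toFinset.mpr (hfU y hy), hdisj y hy⟩
            have hy2 := hsub hy1
            rw [Finset.mem_filter] at hy2
            exact hy2.2 ((hmemU y).mpr (Or.inr hy))
        have := Finset.card_lt_card hss
        omega
      obtain ⟨hn, hm⟩ := ih (PySem.Set.union visited frontier)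
        (pvBStep cm (PySem.Set.union visited frontier) frontier)
        (PySem.Set.nodup_union visited frontier hvn)
        (pvBStep_nodup cm _ frontier)
        (fun x hx => by rcases (hmemU x).mp hx with h | h
                        exacts [hvU x h, hfU x h])
        (fun x hx => by obtain ⟨⟨n, hn', hxn⟩, _⟩ := (hstep x).mp hx
                        exact hUsub n (hfU n hn') x hxn)
        (fun x hx => ((hstep x).mp hx).2)
        hcl' hcard'
      refine ⟨hn, fun x => ?_⟩
      rw [hm x]
      constructor
      · rintro (hv | ⟨s, hs, hpath⟩)
        · rcases (hmemU x).mp hv with h | h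
          · exact Or.inl h
          · exact Or.inr ⟨x, h, Relation.ReflTransGen.refl⟩
        · obtain ⟨⟨n, hn', hsn⟩, _⟩ := (hstep s).mp hs
          exact Or.inr ⟨n, hn', Relation.ReflTransGen.head hsn hpath⟩
      · rintro (hv | ⟨s, hs, hpath⟩)
        · exact Or.inl ((hmemU x).mpr (Or.inl hv))
        · rcases pv_escape cm (PySem.Set.union visited frontier)
            (pvBStep cm (PySem.Set.union visited frontier) frontier) hcl' s x
            ((hmemU s).mpr (Or.inr hs)) hpath with h | ⟨q, hqQ, _, hqpath⟩
          · exact Or.inl h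
          · exact Or.inr ⟨q, hqQ, hqpath⟩

-- reachable nodes stay inside the universe U
theorem pv_reach_subset (cm : List (String × List String)) (U : List String)
    (hUsub : ∀ x ∈ U, ∀ c ∈ pvChildren cm x, c ∈ U) (S : List String)
    (hS : ∀ x ∈ S, x ∈ U) (x : String) (hx : pvReach cm S x) : x ∈ U := by
  obtain ⟨s, hs, hpath⟩ := hx
  induction hpath with
  | refl => exact hS s hs
  | @tail y z _ hedge ih => exact hUsub y ih z hedge

-- the two ports agree (main assembly)
theorem pv_main (cm : List (String × List String)) (sc : List (String × String))
    (ac : List (String × Int)) (q0 : List String) :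
    pvALoop cm sc ac (pvAFuel cm q0) q0 PySem.Set.empty 0 =
      (pvBLoop cm ((PySem.List.dedup (q0 ++ (cm.map Prod.snd).flatten)).length + 1)
          PySem.Set.empty (PySem.Set.ofList q0)).foldl
        (fun t node => if (PySem.Dict.mk sc).get? node = some "Settled on time"
          then t + (PySem.Dict.mk ac).getD node 0 else t) 0 := by
  have hUnodup : (PySem.List.dedup (q0 ++ (cm.map Prod.snd).flatten)).Nodup :=
    PySem.List.nodup_dedup _
  have hUsub : ∀ x ∈ PySem.List.dedup (q0 ++ (cm.map Prod.snd).flatten),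
      ∀ c ∈ pvChildren cm x, c ∈ PySem.List.dedup (q0 ++ (cm.map Prod.snd).flatten) := by
    intro x _ c hc
    exact (PySem.List.mem_dedup _ _).mpr (List.mem_append_right _ (pv_children_sub cm x c hc))
  have hq0U : ∀ x ∈ q0, x ∈ PySem.List.dedup (q0 ++ (cm.map Prod.snd).flatten) :=
    fun x hx => (PySem.List.mem_dedup _ _).mpr (List.mem_append_left _ hx)
  have hfilter : (PySem.List.dedup (q0 ++ (cm.map Prod.snd).flatten)).toFinset.filter
      (fun x => x ∉ (PySem.Set.empty : PySem.Set String)) =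
      (PySem.List.dedup (q0 ++ (cm.map Prod.snd).flatten)).toFinset :=
    Finset.filter_true_of_mem (by intro x _; simp [PySem.Set.empty])
  -- A's loop value
  have hA := pvALoop_eq cm sc ac _ hUnodup hUsub (pvAFuel cm q0) q0 PySem.Set.empty 0
    hq0U (by intro p hp; simp [PySem.Set.empty] at hp)
    (by
      unfold pvPhi pvAFuel
      rw [hfilter, List.sum_toFinset _ hUnodup]
      omega)
  -- B's loop value
  obtain ⟨hBnodup, hBmem⟩ := pvBLoop_mem cm _ hUnodup hUsub
    ((PySem.List.dedup (q0 ++ (cm.map Prod.snd).flatten)).length + 1)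
    PySem.Set.empty (PySem.Set.ofList q0)
    (by simp [PySem.Set.empty]) (PySem.Set.nodup_ofList _)
    (by intro x hx; simp [PySem.Set.empty] at hx)
    (fun x hx => hq0U x ((PySem.Set.mem_ofList _ _).mp hx))
    (by intro x _; simp [PySem.Set.empty])
    (by intro v hv; simp [PySem.Set.empty] at hv)
    (by rw [hfilter, List.toFinset_card_of_nodup hUnodup]; omega)
  -- rewrite B's summation loop
  rw [show (fun (t : Int) node => if (PySem.Dict.mk sc).get? node = some "Settled on time"
      then t + (PySem.Dict.mk ac).getD node 0 else t) =
      (fun (t : Int) node => t + pvW sc ac node) from by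
    funext t node
    unfold pvW
    split_ifs <;> ring]
  rw [PySem.List.foldl_add _ (pvW sc ac) 0, ← List.sum_toFinset _ hBnodup, hA]
  unfold pvRestSum
  rw [show (@Finset.filter _ (fun x => pvReach cm q0 x ∧ x ∉ (PySem.Set.empty : PySem.Set String))
      (fun _ => Classical.propDecidable _)
      (PySem.List.dedup (q0 ++ (cm.map Prod.snd).flatten)).toFinset) =
      (pvBLoop cm ((PySem.List.dedup (q0 ++ (cm.map Prod.snd).flatten)).length + 1)
        PySem.Set.empty (PySem.Set.ofList q0)).toFinset from by
    apply Finset.ext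
    intro z
    simp only [Finset.mem_filter, List.mem_toFinset]
    constructor
    · rintro ⟨_, ⟨s, hs, hpath⟩, -⟩
      exact (hBmem z).mpr (Or.inr ⟨s, (PySem.Set.mem_ofList _ _).mpr hs, hpath⟩)
    · intro hz
      rcases (hBmem z).mp hz with h | ⟨s, hs, hpath⟩
      · simp [PySem.Set.empty] at h
      · have hreach : pvReach cm q0 z := ⟨s, (PySem.Set.mem_ofList _ _).mp hs, hpath⟩
        exact ⟨pv_reach_subset cm _ hUsub q0 hq0U z hreach, hreach,
          by simp [PySem.Set.empty]⟩]

-- ===== VERDICT (by name: the statement is the Claim_ definition above) =====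
theorem get_settled_amount_iterative_spec : Claim_equal_get_settled_amount_iterative := by
  intro parent_id child_map status_cache amount_cache _dom
  unfold Spec_get_settled_amount_iterative get_settled_amount_iterative
    get_settled_amount_iterative_alt
  exact pv_main child_map status_cache amount_cache
    ((PySem.Dict.mk child_map).getD parent_id [])
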